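-- pv_equiv track=rewrite | github.com/Jokin1969/PrionLab-tools | tools/references/external_databases.py | _map_pubmed_type
-- ===== SOURCE A (Python) =====
-- from typing import Dict, List, Optional, Tuple
--
-- def _map_pubmed_type(pub_types: List[str]) -> str:
--     lower = [t.lower() for t in pub_types]
--     if any("review" in t for t in lower):
--         return "review"
--     if any("preprint" in t for t in lower):
--         return "preprint"
--     if any("conference" in t or "proceedings" in t for t in lower):
--         return "conference"
--     return "article"
-- ===== SOURCE B (Python) =====
-- _LABELS = ("review", "preprint", "conference", "article")
--
-- def _rank(t):
--     tl = t.lower()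
--     if "review" in tl:
--         return 0
--     if "preprint" in tl:
--         return 1
--     if "conference" in tl or "proceedings" in tl:
--         return 2
--     return 3
--
-- def _map_pubmed_type(pub_types):
--     return _LABELS[min(map(_rank, pub_types), default=3)]
-- ===== Notes on version B (the rewrite author's own statement) =====
-- stated objective: alternative
-- what changed: Instead of staged any() scans over a lowered list, B maps each element to a numeric category rank (0=review..3=article), takes the minimum rank over the list, and indexes a label table; priority order becomes numeric ordering.
import Mathlib
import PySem

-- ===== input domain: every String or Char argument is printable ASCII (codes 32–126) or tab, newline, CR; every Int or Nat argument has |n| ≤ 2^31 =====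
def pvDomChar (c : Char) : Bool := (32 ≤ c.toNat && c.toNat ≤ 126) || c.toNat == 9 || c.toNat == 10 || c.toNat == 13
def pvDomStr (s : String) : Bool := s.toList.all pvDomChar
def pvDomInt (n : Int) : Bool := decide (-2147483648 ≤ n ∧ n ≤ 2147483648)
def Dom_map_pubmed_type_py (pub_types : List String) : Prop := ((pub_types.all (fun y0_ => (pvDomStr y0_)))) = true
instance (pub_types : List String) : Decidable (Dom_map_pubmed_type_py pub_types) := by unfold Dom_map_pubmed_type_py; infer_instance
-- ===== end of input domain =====

-- B replaces A's staged any() scans with a rank-and-minimum algorithm: each element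
-- is mapped to a numeric category rank, the list minimum is taken, and a label table
-- is indexed (alternative algorithm, same cost).


-- ===== PORT A =====
def map_pubmed_type_py (pub_types : List String) : String :=
  let lower := pub_types.map (fun t => PySem.Str.lower t)
  if lower.any (fun t => PySem.Str.isIn "review" t) then "review"
  else if lower.any (fun t => PySem.Str.isIn "preprint" t) then "preprint"
  else if lower.any (fun t => PySem.Str.isIn "conference" t || PySem.Str.isIn "proceedings" t) then "conference"
  else "article"

-- ===== PORT B =====
def pvRank (t : String) : Nat :=
  let tl := PySem.Str.lower t
  if PySem.Str.isIn "review" tl then 0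
  else if PySem.Str.isIn "preprint" tl then 1
  else if PySem.Str.isIn "conference" tl || PySem.Str.isIn "proceedings" tl then 2
  else 3

def map_pubmed_type_py_alt (pub_types : List String) : String :=
  -- min(map(_rank, pub_types), default=3) as a fold; _LABELS[m] with m ≤ 3 always
  let m := (pub_types.map pvRank).foldl Nat.min 3
  ["review", "preprint", "conference", "article"].getD m "article"

-- ===== PRECONDITION & SPEC =====
def Spec_map_pubmed_type_py (pub_types : List String) (out : String) : Prop := out = map_pubmed_type_py_alt pub_types
instance (pub_types : List String) (out : String) : Decidable (Spec_map_pubmed_type_py pub_types out) := by unfold Spec_map_pubmed_type_py; infer_instance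

-- ===== CLAIM (what is proved, stated in full; the proofs are below) =====
def Claim_equal_map_pubmed_type_py : Prop := ∀ (pub_types : List String), Dom_map_pubmed_type_py pub_types → Spec_map_pubmed_type_py pub_types (map_pubmed_type_py pub_types)

-- ===== LEMMAS AND PROOFS =====

theorem pv_foldl_min_le_iff (l : List Nat) (a k : Nat) :
    l.foldl Nat.min a ≤ k ↔ a ≤ k ∨ ∃ x ∈ l, x ≤ k := by
  induction l generalizing a with
  | nil => simp
  | cons x xs ih =>
    simp only [List.foldl_cons, ih, List.mem_cons]
    constructor
    · rintro (h | ⟨y, hy, hyk⟩)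
      · rcases min_le_iff.mp h with h | h
        · exact Or.inl h
        · exact Or.inr ⟨x, Or.inl rfl, h⟩
      · exact Or.inr ⟨y, Or.inr hy, hyk⟩
    · rintro (h | ⟨y, hy | hy, hyk⟩)
      · exact Or.inl (le_trans (min_le_left _ _) h)
      · exact Or.inl (le_trans (min_le_right _ _) (hy ▸ hyk))
      · exact Or.inr ⟨y, hy, hyk⟩

theorem pvRank_le0 (t : String) :
    (pvRank t ≤ 0) ↔ PySem.Str.isIn "review" (PySem.Str.lower t) = true := by
  simp only [pvRank]; split_ifs <;> simp_all

theorem pvRank_le1 (t : String) :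
    (pvRank t ≤ 1) ↔ (PySem.Str.isIn "review" (PySem.Str.lower t) = true ∨
      PySem.Str.isIn "preprint" (PySem.Str.lower t) = true) := by
  simp only [pvRank]; split_ifs <;> simp_all

theorem pvRank_le2 (t : String) :
    (pvRank t ≤ 2) ↔ (PySem.Str.isIn "review" (PySem.Str.lower t) = true ∨
      PySem.Str.isIn "preprint" (PySem.Str.lower t) = true ∨
      (PySem.Str.isIn "conference" (PySem.Str.lower t) || PySem.Str.isIn "proceedings" (PySem.Str.lower t)) = true) := by
  simp only [pvRank]; split_ifs <;> simp_all

-- ===== VERDICT (by name: the statement is the Claim_ definition above) =====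
theorem map_pubmed_type_py_spec : Claim_equal_map_pubmed_type_py := by
  intro xs _
  unfold Spec_map_pubmed_type_py map_pubmed_type_py map_pubmed_type_py_alt
  simp only [List.any_map, Function.comp_def]
  set m := (xs.map pvRank).foldl Nat.min 3 with hm
  have hle : ∀ k, m ≤ k ↔ 3 ≤ k ∨ ∃ t ∈ xs, pvRank t ≤ k := by
    intro k
    rw [hm, pv_foldl_min_le_iff]
    simp
  have hm3 : m ≤ 3 := (hle 3).mpr (Or.inl le_rfl)
  by_cases hR : xs.any (fun t => PySem.Str.isIn "review" (PySem.Str.lower t)) = true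
  · obtain ⟨t, ht, hP⟩ := List.any_eq_true.mp hR
    have h0 : m = 0 := by
      have := (hle 0).mpr (Or.inr ⟨t, ht, (pvRank_le0 t).mpr hP⟩)
      omega
    rw [if_pos hR, h0]; rfl
  · have hnR : ¬ m ≤ 0 := by
      intro h
      rcases (hle 0).mp h with h | ⟨t, ht, hr⟩
      · omega
      · exact hR (List.any_eq_true.mpr ⟨t, ht, (pvRank_le0 t).mp hr⟩)
    by_cases hP : xs.any (fun t => PySem.Str.isIn "preprint" (PySem.Str.lower t)) = true
    · obtain ⟨t, ht, hp⟩ := List.any_eq_true.mp hP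
      have h1 : m = 1 := by
        have := (hle 1).mpr (Or.inr ⟨t, ht, (pvRank_le1 t).mpr (Or.inr hp)⟩)
        omega
      rw [if_neg hR, if_pos hP, h1]; rfl
    · have hnP : ¬ m ≤ 1 := by
        intro h
        rcases (hle 1).mp h with h | ⟨t, ht, hr⟩
        · omega
        · rcases (pvRank_le1 t).mp hr with h' | h'
          · exact hR (List.any_eq_true.mpr ⟨t, ht, h'⟩)
          · exact hP (List.any_eq_true.mpr ⟨t, ht, h'⟩)
      by_cases hC : xs.any (fun t => PySem.Str.isIn "conference" (PySem.Str.lower t) || PySem.Str.isIn "proceedings" (PySem.Str.lower t)) = true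
      · obtain ⟨t, ht, hc⟩ := List.any_eq_true.mp hC
        have h2 : m = 2 := by
          have := (hle 2).mpr (Or.inr ⟨t, ht, (pvRank_le2 t).mpr (Or.inr (Or.inr hc))⟩)
          omega
        rw [if_neg hR, if_neg hP, if_pos hC, h2]; rfl
      · have hnC : ¬ m ≤ 2 := by
          intro h
          rcases (hle 2).mp h with h | ⟨t, ht, hr⟩
          · omega
          · rcases (pvRank_le2 t).mp hr with h' | h' | h'
            · exact hR (List.any_eq_true.mpr ⟨t, ht, h'⟩)
            · exact hP (List.any_eq_true.mpr ⟨t, ht, h'⟩)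
            · exact hC (List.any_eq_true.mpr ⟨t, ht, h'⟩)
        have h3 : m = 3 := by omega
        rw [if_neg hR, if_neg hP, if_neg hC, h3]; rfl
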